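-- pv_equiv track=rewrite | github.com/lucastheo/string-utils | casamento.py | quantidadePrimeiraLetraIgual
-- ===== SOURCE A (Python) =====
-- def quantidadePrimeiraLetraIgual( lista0:list, lista1:list):
--     '''
--     Percorre os nomes verificando se tem nome parecido
--     '''
--     cont = 0
--     apoList1 = lista1[:]
--     for nome0 in lista0:
--         apo0 = nome0[0]
--         for nome1 in apoList1:
--             apo1 = nome1[0]
--             if apo0 == apo1:
--                 cont += 1
--                 apoList1.remove( nome1)
--                 break
--     return cont
-- ===== SOURCE B (Python) =====
-- def quantidadePrimeiraLetraIgual(lista0: list, lista1: list):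
--     '''
--     One pass: tally first letters of lista1 in a dict, then consume
--     tallies while scanning lista0 (no nested scan, no list removal).
--     '''
--     avail = {}
--     for nome1 in lista1:
--         c = nome1[0]
--         avail[c] = avail.get(c, 0) + 1
--     cont = 0
--     for nome0 in lista0:
--         c = nome0[0]
--         if avail.get(c, 0) > 0:
--             avail[c] = avail.get(c, 0) - 1
--             cont += 1
--     return cont
-- ===== Notes on version B (the rewrite author's own statement) =====
-- stated objective: faster
-- what changed: Replaces the quadratic nested scan with element removal by a single dict tally of lista1's first letters that is decremented in one pass over lista0.
-- outside the precondition, e.g. on quantidadePrimeiraLetraIgual([], ['']): A returns 0, B raises IndexError; on quantidadePrimeiraLetraIgual(['a'], ['apple', '']): A returns 1, B raises IndexError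
import Mathlib
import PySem

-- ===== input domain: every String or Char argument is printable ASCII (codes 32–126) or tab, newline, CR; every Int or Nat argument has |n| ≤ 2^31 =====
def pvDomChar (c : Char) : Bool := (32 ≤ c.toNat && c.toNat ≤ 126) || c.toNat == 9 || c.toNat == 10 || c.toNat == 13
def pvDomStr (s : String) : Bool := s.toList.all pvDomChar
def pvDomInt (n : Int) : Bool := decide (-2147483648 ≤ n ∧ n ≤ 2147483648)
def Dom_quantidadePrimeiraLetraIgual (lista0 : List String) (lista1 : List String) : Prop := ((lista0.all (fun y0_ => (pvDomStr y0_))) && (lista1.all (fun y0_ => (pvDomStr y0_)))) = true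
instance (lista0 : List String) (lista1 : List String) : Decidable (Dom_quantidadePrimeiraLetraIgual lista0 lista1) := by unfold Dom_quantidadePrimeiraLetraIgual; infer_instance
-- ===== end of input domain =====

-- B replaces A's quadratic nested scan with removal by a one-pass dict tally of first
-- letters (objective: faster). Proved equal on Pre_ (all names non-empty; see Pre_).

-- first character of a name: Python's nome[0]; on Pre_ every name is non-empty, so the
-- default branch of pyGet? is never the one A's Python reaches (A raises outside Pre_).
def pvFirst (s : String) : Char := (PySem.Str.pyGet? s 0).getD ' '

-- ===== PORT A =====
-- inner 'for nome1 in apoList1: if match: cont += 1; apoList1.remove(nome1); break'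
-- = find the first matching element, then list.remove it (PySem.List.remove?).
def quantidadePrimeiraLetraIgual (lista0 : List String) (lista1 : List String) : Int :=
  let apoList1 := lista1  -- lista1[:]
  let st := lista0.foldl (fun (st : Int × List String) nome0 =>
    let apo0 := pvFirst nome0
    match st.2.find? (fun nome1 => pvFirst nome1 == apo0) with
    | some nome1 => (st.1 + 1, (PySem.List.remove? st.2 nome1).getD st.2)
    | none => st) (0, apoList1)
  st.1

-- ===== PORT B =====
def quantidadePrimeiraLetraIgual_alt (lista0 : List String) (lista1 : List String) : Int :=
  let avail := lista1.foldl (fun (d : PySem.Dict Char Int) nome1 =>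
    let c := pvFirst nome1
    d.insert c (d.getD c 0 + 1)) PySem.Dict.empty
  let st := lista0.foldl (fun (st : PySem.Dict Char Int × Int) nome0 =>
    let c := pvFirst nome0
    if 0 < st.1.getD c 0 then (st.1.insert c (st.1.getD c 0 - 1), st.2 + 1) else st)
    (avail, 0)
  st.2

-- ===== PRECONDITION & SPEC =====
-- Pre_ excludes inputs containing an empty name: on those A raises IndexError or, when the
-- empty name is never scanned, returns lazily, while B reads every first letter up front and raises.
def Pre_quantidadePrimeiraLetraIgual (lista0 : List String) (lista1 : List String) : Prop :=
  ((lista0.all (fun s => !s.isEmpty)) && (lista1.all (fun s => !s.isEmpty))) = true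
instance (lista0 : List String) (lista1 : List String) : Decidable (Pre_quantidadePrimeiraLetraIgual lista0 lista1) := by unfold Pre_quantidadePrimeiraLetraIgual; infer_instance
def pvWitness_quantidadePrimeiraLetraIgual : List String × List String := (["ana", "bob"], ["bea", "alice", "ana"])
def Spec_quantidadePrimeiraLetraIgual (lista0 : List String) (lista1 : List String) (out : Int) : Prop := out = quantidadePrimeiraLetraIgual_alt lista0 lista1
instance (lista0 : List String) (lista1 : List String) (out : Int) : Decidable (Spec_quantidadePrimeiraLetraIgual lista0 lista1 out) := by unfold Spec_quantidadePrimeiraLetraIgual; infer_instance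

-- ===== CLAIM (what is proved, stated in full; the proofs are below) =====
def Claim_equal_quantidadePrimeiraLetraIgual : Prop := ∀ (lista0 : List String) (lista1 : List String), Dom_quantidadePrimeiraLetraIgual lista0 lista1 → Pre_quantidadePrimeiraLetraIgual lista0 lista1 → Spec_quantidadePrimeiraLetraIgual lista0 lista1 (quantidadePrimeiraLetraIgual lista0 lista1)

-- ===== LEMMAS AND PROOFS =====

-- number of names in l whose first letter is c
def pvCount (l : List String) (c : Char) : Nat := l.countP (fun n => pvFirst n == c)

theorem pvCount_erase (l : List String) (m : String) (hm : m ∈ l) (c : Char) :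
    pvCount (l.erase m) c = pvCount l c - (if pvFirst m == c then 1 else 0) := by
  induction l with
  | nil => cases hm
  | cons a l ih =>
    by_cases ha : a = m
    · subst ha
      rw [List.erase_cons_head]
      simp only [pvCount, List.countP_cons]
      by_cases hp : (pvFirst a == c) = true <;> simp [hp]
    · have hne : (a == m) = false := by simp [ha]
      have hml : m ∈ l := by
        rcases List.mem_cons.mp hm with h | h
        · exact absurd h.symm ha
        · exact h
      rw [List.erase_cons_tail (by simp [ha])]
      simp only [pvCount, List.countP_cons] at *
      rw [ih hml]
      have hge : (if (pvFirst m == c) = true then 1 else 0) ≤ l.countP (fun n => pvFirst n == c) := by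
        by_cases hp : (pvFirst m == c) = true
        · simp only [hp, if_pos]
          exact List.countP_pos_iff.mpr ⟨m, hml, hp⟩
        · simp [hp]
      split_ifs at hge ⊢ <;> omega

-- building the tally: getD of the fold adds pvCount
theorem pvBuild_getD (l : List String) (d : PySem.Dict Char Int) (c : Char) :
    (l.foldl (fun (d : PySem.Dict Char Int) nome1 =>
      d.insert (pvFirst nome1) (d.getD (pvFirst nome1) 0 + 1)) d).getD c 0
      = d.getD c 0 + (pvCount l c : Int) := by
  induction l generalizing d with
  | nil => simp [pvCount]
  | cons a l ih =>
    rw [List.foldl_cons, ih, PySem.Dict.getD_insert]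
    simp only [pvCount, List.countP_cons]
    by_cases h : pvFirst a = c
    · subst h
      simp only [beq_self_eq_true, if_pos]
      push_cast
      ring
    · have h' : (pvFirst a == c) = false := by simpa using h
      have h'' : ¬ c = pvFirst a := fun e => h e.symm
      simp [h', h'']

-- main loop invariant: if d's tallies equal the pool's first-letter counts, the two
-- folds produce the same count.
theorem pvMain (l0 : List String) (pool : List String) (d : PySem.Dict Char Int) (cont : Int)
    (hinv : ∀ c, d.getD c 0 = (pvCount pool c : Int)) :
    (l0.foldl (fun (st : Int × List String) nome0 =>
      let apo0 := pvFirst nome0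
      match st.2.find? (fun nome1 => pvFirst nome1 == apo0) with
      | some nome1 => (st.1 + 1, (PySem.List.remove? st.2 nome1).getD st.2)
      | none => st) (cont, pool)).1
    = (l0.foldl (fun (st : PySem.Dict Char Int × Int) nome0 =>
      let c := pvFirst nome0
      if 0 < st.1.getD c 0 then (st.1.insert c (st.1.getD c 0 - 1), st.2 + 1) else st)
      (d, cont)).2 := by
  induction l0 generalizing pool d cont with
  | nil => simp
  | cons nome0 l0 ih =>
    simp only [List.foldl_cons]
    set c0 := pvFirst nome0 with hc0
    cases hfind : pool.find? (fun nome1 => pvFirst nome1 == c0) with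
    | none =>
      have hzero : pvCount pool c0 = 0 := by
        rw [pvCount, List.countP_eq_zero]
        intro n hn
        have := List.find?_eq_none.mp hfind n hn
        simpa using this
      have hB : ¬ 0 < d.getD c0 0 := by rw [hinv c0, hzero]; simp
      rw [if_neg hB]
      exact ih pool d cont hinv
    | some m =>
      have hpm : (pvFirst m == c0) = true := by
        have h := List.find?_some hfind
        simpa using h
      have hmem : m ∈ pool := List.mem_of_find?_eq_some hfind
      have hpos : 0 < pvCount pool c0 :=
        List.countP_pos_iff.mpr ⟨m, hmem, hpm⟩
      have hB : 0 < d.getD c0 0 := by rw [hinv c0]; exact_mod_cast hpos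
      have hrem : PySem.List.remove? pool m = some (pool.erase m) :=
        PySem.List.remove?_eq_some_erase pool m hmem
      simp only [hrem, if_pos hB, Option.getD_some]
      apply ih
      intro c
      rw [PySem.Dict.getD_insert, pvCount_erase pool m hmem c]
      by_cases hc : c = c0
      · subst hc
        have hpc : (pvFirst m == c0) = true := by simp [hpm]
        rw [hinv c0]
        simp only [hpc, if_true]
        omega
      · have hne : pvFirst m ≠ c := by rw [beq_iff_eq.mp hpm]; exact fun e => hc e.symm
        have hf : (pvFirst m == c) = false := beq_eq_false_iff_ne.mpr hne
        rw [hinv c]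
        simp [hc, hf]

-- ===== VERDICT (by name: the statement is the Claim_ definition above) =====
theorem quantidadePrimeiraLetraIgual_spec : Claim_equal_quantidadePrimeiraLetraIgual := by
  intro lista0 lista1 _hdom _hpre
  unfold Spec_quantidadePrimeiraLetraIgual quantidadePrimeiraLetraIgual quantidadePrimeiraLetraIgual_alt
  refine pvMain lista0 lista1
    (lista1.foldl (fun (d : PySem.Dict Char Int) nome1 =>
      d.insert (pvFirst nome1) (d.getD (pvFirst nome1) 0 + 1)) PySem.Dict.empty) 0 ?_
  intro c
  rw [pvBuild_getD]
  simp
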